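-- pv_equiv track=rewrite | github.com/zekehuntergreen/advent-of-code-2023 | day7/day7.py | __get_type_score
-- ===== SOURCE A (Python) =====
-- def __get_type_score(hand):
--     hand_dict = {}
--     for c in hand:
--         if c in hand_dict:
--             hand_dict[c] += 1
--         else:
--             hand_dict[c] = 1
--     return sorted(hand_dict.values(), reverse=-1)
-- ===== SOURCE B (Python) =====
-- def __get_type_score(hand):
--     lengths = []
--     run = 0
--     prev = None
--     for c in sorted(hand):
--         if run > 0 and c == prev:
--             run += 1
--         else:
--             if run > 0:
--                 lengths.append(run)
--             run = 1
--             prev = c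
--     if run > 0:
--         lengths.append(run)
--     return sorted(lengths, reverse=True)
-- ===== Notes on version B (the rewrite author's own statement) =====
-- stated objective: alternative
-- what changed: B replaces A's hash-dict frequency counting with a sort-then-scan: it sorts the characters and emits the length of each run of equal characters in one pass, then sorts the run lengths descending.
import Mathlib
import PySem

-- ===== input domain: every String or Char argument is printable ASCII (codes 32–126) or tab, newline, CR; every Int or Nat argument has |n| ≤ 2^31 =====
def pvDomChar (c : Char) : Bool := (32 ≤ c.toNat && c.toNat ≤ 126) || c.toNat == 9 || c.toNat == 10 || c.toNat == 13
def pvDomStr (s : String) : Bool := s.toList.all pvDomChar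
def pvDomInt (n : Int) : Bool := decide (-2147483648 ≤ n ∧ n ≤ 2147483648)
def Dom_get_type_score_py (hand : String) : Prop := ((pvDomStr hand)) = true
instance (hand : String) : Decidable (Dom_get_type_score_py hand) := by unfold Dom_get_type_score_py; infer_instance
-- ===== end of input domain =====

-- B replaces A's hash-counting dict with a sort-then-scan over runs of equal characters (alternative decomposition, same cost class).

-- ===== PORT A =====
-- for c in hand: if c in hand_dict: hand_dict[c] += 1 else: hand_dict[c] = 1; return sorted(values, reverse=-1)
def get_type_score_py (hand : String) : List Int :=
  let hand_dict := hand.toList.foldl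
    (fun d c => if d.contains c then d.insert c (d.getD c 0 + 1) else d.insert c 1)
    (PySem.Dict.empty : PySem.Dict Char Int)
  PySem.List.sorted hand_dict.values (fun x => x) true

-- ===== PORT B =====
-- loop body of Source B: state = (lengths, run, prev); prev is None initially
def get_type_score_py_stepB (st : List Int × Int × Option Char) (c : Char) :
    List Int × Int × Option Char :=
  if 0 < st.2.1 ∧ st.2.2 == some c then (st.1, st.2.1 + 1, st.2.2)
  else ((if 0 < st.2.1 then st.1 ++ [st.2.1] else st.1), 1, some c)

def get_type_score_py_alt (hand : String) : List Int :=
  let st := (PySem.List.sorted hand.toList (fun x => x) false).foldl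
    get_type_score_py_stepB ([], 0, none)
  let lengths := if 0 < st.2.1 then st.1 ++ [st.2.1] else st.1
  PySem.List.sorted lengths (fun x => x) true

-- ===== PRECONDITION & SPEC =====
def Spec_get_type_score_py (hand : String) (out : List Int) : Prop := out = get_type_score_py_alt hand
instance (hand : String) (out : List Int) : Decidable (Spec_get_type_score_py hand out) := by unfold Spec_get_type_score_py; infer_instance

-- ===== CLAIM (what is proved, stated in full; the proofs are below) =====
def Claim_equal_get_type_score_py : Prop := ∀ (hand : String), Dom_get_type_score_py hand → Spec_get_type_score_py hand (get_type_score_py hand)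

-- ===== LEMMAS AND PROOFS =====

-- run lengths of consecutive equal characters (the value B's scan computes on the sorted list)
def runsOf : List Char → List Int
  | [] => []
  | c :: t => (((t.takeWhile (· == c)).length : Int) + 1) :: runsOf (t.dropWhile (· == c))
termination_by l => l.length
decreasing_by simpa using Nat.lt_succ_of_le (List.length_dropWhile_le _ _)

def finishB (st : List Int × Int × Option Char) : List Int :=
  if 0 < st.2.1 then st.1 ++ [st.2.1] else st.1

-- two sorted-descending lists of the same multiset of Ints are equal
lemma sorted_rev_eq_of_perm (X Y : List Int) (h : X.Perm Y) :
    PySem.List.sorted X (fun x => x) true = PySem.List.sorted Y (fun x => x) true := by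
  have h1 := PySem.List.sorted_perm X (fun x : Int => x) true
  have h2 := PySem.List.sorted_perm Y (fun x : Int => x) true
  have hp : (PySem.List.sorted X (fun x => x) true).Perm (PySem.List.sorted Y (fun x => x) true) :=
    h1.trans (h.trans h2.symm)
  exact hp.eq_of_pairwise (fun a b _ _ hab hba => le_antisymm hba hab)
    (PySem.List.sorted_pairwise_rev X (fun x : Int => x))
    (PySem.List.sorted_pairwise_rev Y (fun x : Int => x))

-- A's counting loop is Counter(hand)
lemma foldA_eq_counter (l : List Char) :
    l.foldl (fun d c => if d.contains c then d.insert c (d.getD c 0 + 1) else d.insert c 1)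
      (PySem.Dict.empty : PySem.Dict Char Int) = PySem.Dict.counter l := by
  rw [← PySem.Dict.foldl_insert_getD_add_one_eq_counter]
  apply PySem.List.foldl_congr_mem
  intro d c _
  by_cases h : d.contains c
  · simp [h]
  · have h' : d.contains c = false := by simpa using h
    simp [h, PySem.Dict.getD_of_not_contains (h := h')]

lemma values_counter (l : List Char) :
    (PySem.Dict.counter l).values = (PySem.Set.ofList l).map (fun k => (l.count k : Int)) := by
  have := PySem.Dict.items_counter (xs := l)
  simp [PySem.Dict.values, this]

-- B's scan, resumed mid-run, finishes the current run and then emits the remaining run lengths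
lemma fold_run : ∀ (t : List Char) (c : Char) (acc : List Int) (n : Int), 0 < n →
    finishB (t.foldl get_type_score_py_stepB (acc, n, some c)) =
      acc ++ (n + ((t.takeWhile (· == c)).length : Int)) :: runsOf (t.dropWhile (· == c))
  | [], c, acc, n, hn => by simp [finishB, runsOf, if_pos hn]
  | b :: t', c, acc, n, hn => by
    by_cases hb : b = c
    · subst hb
      have h1 : get_type_score_py_stepB (acc, n, some b) b = (acc, n + 1, some b) := by
        simp [get_type_score_py_stepB, hn]
      rw [List.foldl_cons, h1, fold_run t' b acc (n+1) (by omega)]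
      simp
      ring_nf
    · have h1 : get_type_score_py_stepB (acc, n, some c) b = (acc ++ [n], 1, some b) := by
        have : (some c == some b) = false := by
          simp; exact fun h => hb h.symm
        simp [get_type_score_py_stepB, this, if_pos hn]
      rw [List.foldl_cons, h1, fold_run t' b (acc ++ [n]) 1 (by omega)]
      have hbc : (b == c) = false := by simpa using hb
      simp [hbc, runsOf]
      ring_nf

lemma head_drop_not (p : Char → Bool) : ∀ (t : List Char) {b : Char} {r : List Char},
    t.dropWhile p = b :: r → p b = false := by
  intro t
  induction t with
  | nil => intro b r h; simp at h
  | cons a t ih =>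
    intro b r h
    by_cases hp : p a
    · rw [List.dropWhile_cons_of_pos hp] at h; exact ih h
    · rw [List.dropWhile_cons_of_neg hp] at h
      cases h; simpa using hp

-- on a sorted list, the run lengths are a permutation of the per-distinct-element counts
lemma runs_perm : ∀ (s : List Char), s.Pairwise (· ≤ ·) →
    (runsOf s).Perm ((PySem.Set.ofList s).map (fun k => (s.count k : Int)))
  | [], _ => by simp [runsOf]
  | c :: t, hs => by
    have htwc : ∀ x ∈ t.takeWhile (· == c), x = c := fun x hx => by
      have := List.mem_takeWhile_imp hx; simpa using this
    have hct : ∀ x ∈ t, c ≤ x := (List.pairwise_cons.mp hs).1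
    have ht : t.Pairwise (· ≤ ·) := (List.pairwise_cons.mp hs).2
    have hsplit : t.takeWhile (· == c) ++ t.dropWhile (· == c) = t :=
      List.takeWhile_append_dropWhile ..
    have ht2p : (t.dropWhile (· == c)).Pairwise (· ≤ ·) := by
      conv at ht => rw [← hsplit]
      exact List.Pairwise.sublist (List.sublist_append_right _ _) ht
    have hct2 : c ∉ t.dropWhile (· == c) := by
      intro hc
      cases h2 : t.dropWhile (· == c) with
      | nil => rw [h2] at hc; simp at hc
      | cons b r =>
        have hbne : b ≠ c := by simpa using head_drop_not _ t h2
        have hcb : c < b := lt_of_le_of_ne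
          (hct b (by rw [← hsplit, h2]; exact List.mem_append_right _ (by simp))) (Ne.symm hbne)
        rw [h2] at hc
        rcases List.mem_cons.mp hc with h | h
        · exact hbne h.symm
        · have : b ≤ c := (List.pairwise_cons.mp (h2 ▸ ht2p)).1 c h
          exact absurd this (not_le.mpr hcb)
    have hcount_c : ((c :: t).count c : Int) = ((t.takeWhile (· == c)).length : Int) + 1 := by
      have h1 : t.count c = (t.takeWhile (· == c)).length := by
        conv_lhs => rw [← hsplit]
        rw [List.count_append, List.count_eq_length.mpr (fun b hb => (htwc b hb).symm),
            List.count_eq_zero.mpr hct2, Nat.add_zero]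
      rw [List.count_cons_self, h1]
      push_cast
      ring
    have hcount_ne : ∀ k ∈ t.dropWhile (· == c),
        (c :: t).count k = (t.dropWhile (· == c)).count k := by
      intro k hk
      have hkc : k ≠ c := fun h => hct2 (h ▸ hk)
      have h0 : (t.takeWhile (· == c)).count k = 0 :=
        List.count_eq_zero.mpr (fun hmem => hkc (htwc k hmem))
      have h2 : t.count k = (t.dropWhile (· == c)).count k := by
        conv_lhs => rw [← hsplit]
        rw [List.count_append, h0, Nat.zero_add]
      simp [List.count_cons, h2]
      exact fun h => hkc h.symm
    have hperm : (PySem.Set.ofList (c :: t)).Perm (c :: PySem.Set.ofList (t.dropWhile (· == c))) := by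
      rw [List.perm_ext_iff_of_nodup (PySem.Set.nodup_ofList _)
        (by simp only [List.nodup_cons]
            exact ⟨fun h => hct2 ((PySem.Set.mem_ofList _ _).mp h), PySem.Set.nodup_ofList _⟩)]
      intro a
      simp only [PySem.Set.mem_ofList, List.mem_cons]
      constructor
      · rintro (rfl | h)
        · left; rfl
        · rw [← hsplit] at h
          rcases List.mem_append.mp h with h | h
          · left; exact htwc a h
          · right; exact h
      · rintro (rfl | h)
        · left; rfl
        · right
          rw [← hsplit]
          exact List.mem_append_right _ h
    have IH := runs_perm (t.dropWhile (· == c)) ht2p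
    rw [runsOf]
    refine List.Perm.trans ?_ ((hperm.map _).symm)
    rw [List.map_cons]
    rw [← hcount_c]
    refine List.Perm.cons _ (IH.trans (List.Perm.of_eq (List.map_congr_left ?_)))
    intro k hk
    rw [hcount_ne k ((PySem.Set.mem_ofList _ _).mp hk)]
termination_by s => s.length
decreasing_by simpa using Nat.lt_succ_of_le (List.length_dropWhile_le _ _)

-- B's whole scan on the sorted list computes exactly the run lengths
lemma scan_eq_runs (l : List Char) :
    finishB ((PySem.List.sorted l (fun x => x) false).foldl get_type_score_py_stepB ([], 0, none)) =
      runsOf (PySem.List.sorted l (fun x => x) false) := by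
  cases hs : PySem.List.sorted l (fun x => x) false with
  | nil => simp [finishB, runsOf]
  | cons c s' =>
    have h1 : get_type_score_py_stepB ([], 0, none) c = ([], 1, some c) := by
      simp [get_type_score_py_stepB]
    rw [List.foldl_cons, h1, fold_run s' c [] 1 (by omega)]
    rw [runsOf]
    simp
    ring_nf

-- ===== VERDICT (by name: the statement is the Claim_ definition above) =====
theorem get_type_score_py_spec : Claim_equal_get_type_score_py := by
  intro hand _
  unfold Spec_get_type_score_py get_type_score_py get_type_score_py_alt
  dsimp only
  set l := hand.toList with hl
  set s := PySem.List.sorted l (fun x => x) false with hsdef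
  rw [foldA_eq_counter, values_counter]
  have hfin : (if 0 < (s.foldl get_type_score_py_stepB ([], 0, none)).2.1 then
      (s.foldl get_type_score_py_stepB ([], 0, none)).1 ++
        [(s.foldl get_type_score_py_stepB ([], 0, none)).2.1]
      else (s.foldl get_type_score_py_stepB ([], 0, none)).1) = runsOf s := scan_eq_runs l
  rw [hfin]
  -- both sides are sorted-descending; it suffices that the multisets agree
  apply sorted_rev_eq_of_perm
  have hsl : s.Perm l := PySem.List.sorted_perm l (fun x => x) false
  have hsp : s.Pairwise (· ≤ ·) := by
    have := PySem.List.sorted_pairwise l (fun x : Char => x)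
    simpa using this
  have hcnt : ∀ k, s.count k = l.count k := fun k => hsl.count_eq k
  have hsets : (PySem.Set.ofList l).Perm (PySem.Set.ofList s) := by
    rw [List.perm_ext_iff_of_nodup (PySem.Set.nodup_ofList _) (PySem.Set.nodup_ofList _)]
    intro a
    simp only [PySem.Set.mem_ofList]
    exact ⟨fun h => (hsl.mem_iff).mpr h, fun h => (hsl.mem_iff).mp h⟩
  refine List.Perm.trans (hsets.map _) ?_
  refine List.Perm.trans (List.Perm.of_eq (List.map_congr_left ?_)) (runs_perm s hsp).symm
  intro k _
  rw [hcnt k]
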